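-- pv_equiv track=rewrite | github.com/DBCDK/CowBrow | ui/cowbrow_web.py | split_map_in_two_columns
-- ===== SOURCE A (Python) =====
-- def split_map_in_two_columns(table_of_maps):
--     rearranged = []
--     _line = []
--     for k, v in table_of_maps.items():
--         if len(_line) == 0:
--             _line = [{k: v}]
--         else:
--             _line.append({k: v})
--             rearranged.append(_line)
--             _line=[]
--
--     return rearranged
-- ===== SOURCE B (Python) =====
-- def split_map_in_two_columns(table_of_maps):
--     it = iter(table_of_maps.items())
--     return [[{a: b}, {c: d}] for (a, b), (c, d) in zip(it, it)]
-- ===== Notes on version B (the rewrite author's own statement) =====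
-- stated objective: idiomatic
-- what changed: Replaced the stateful even/odd _line accumulator loop with a pairwise traversal: zip over a single items() iterator consumes two entries at a time, the list comprehension builds each row directly and the odd trailing item is dropped by zip itself.
import Mathlib
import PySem

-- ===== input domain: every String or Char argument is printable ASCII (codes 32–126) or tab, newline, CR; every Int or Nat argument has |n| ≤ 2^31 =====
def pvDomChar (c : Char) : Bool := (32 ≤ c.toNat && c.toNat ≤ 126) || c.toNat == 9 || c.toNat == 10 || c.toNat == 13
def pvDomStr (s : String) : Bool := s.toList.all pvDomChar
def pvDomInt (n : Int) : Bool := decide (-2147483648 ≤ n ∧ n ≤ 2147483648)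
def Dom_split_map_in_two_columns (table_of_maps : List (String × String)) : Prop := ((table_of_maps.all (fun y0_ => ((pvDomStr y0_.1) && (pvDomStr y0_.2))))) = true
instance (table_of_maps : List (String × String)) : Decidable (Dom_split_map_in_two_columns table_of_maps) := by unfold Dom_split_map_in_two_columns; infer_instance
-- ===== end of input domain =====

-- B replaces A's stateful even/odd accumulator loop with a direct pairwise (two-at-a-time) traversal; idiomatic, same cost.

-- ===== PORT A =====
-- A: fold over the items with state (rearranged, _line); _line toggles between [] and a one-element row.
def split_map_in_two_columns (table_of_maps : List (String × String)) : List (List (List (String × String))) :=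
  (table_of_maps.foldl
    (fun (st : List (List (List (String × String))) × List (List (String × String))) kv =>
      if st.2.length = 0 then (st.1, [[kv]])
      else (st.1 ++ [st.2 ++ [[kv]]], []))
    ([], [])).1

-- ===== PORT B =====
-- B: consume two items at a time (the zip(it, it) comprehension), dropping a trailing odd item.
def split_map_in_two_columns_alt : List (String × String) → List (List (List (String × String)))
  | a :: b :: rest => [[a], [b]] :: split_map_in_two_columns_alt rest
  | _ => []

-- ===== PRECONDITION & SPEC =====
def Spec_split_map_in_two_columns (table_of_maps : List (String × String)) (out : List (List (List (String × String)))) : Prop := out = split_map_in_two_columns_alt table_of_maps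
instance (table_of_maps : List (String × String)) (out : List (List (List (String × String)))) : Decidable (Spec_split_map_in_two_columns table_of_maps out) := by unfold Spec_split_map_in_two_columns; infer_instance

-- ===== CLAIM (what is proved, stated in full; the proofs are below) =====
def Claim_equal_split_map_in_two_columns : Prop := ∀ (table_of_maps : List (String × String)), Dom_split_map_in_two_columns table_of_maps → Spec_split_map_in_two_columns table_of_maps (split_map_in_two_columns table_of_maps)

-- ===== LEMMAS AND PROOFS =====

-- Loop invariant: starting from an even state (_line = []), the fold appends B's pairwise result to the accumulated rows.
theorem split_foldl_inv (t : List (String × String))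
    (acc : List (List (List (String × String)))) :
    (t.foldl
      (fun (st : List (List (List (String × String))) × List (List (String × String))) kv =>
        if st.2.length = 0 then (st.1, [[kv]])
        else (st.1 ++ [st.2 ++ [[kv]]], []))
      (acc, [])).1 = acc ++ split_map_in_two_columns_alt t := by
  induction t using split_map_in_two_columns_alt.induct generalizing acc with
  | case1 a b rest ih =>
      simpa [List.foldl, split_map_in_two_columns_alt] using ih (acc ++ [[[a], [b]]])
  | case2 t h1 =>
      rcases t with _ | ⟨x, _ | ⟨y, ys⟩⟩
      · simp [split_map_in_two_columns_alt]
      · simp [List.foldl, split_map_in_two_columns_alt]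
      · exact absurd rfl (h1 x y ys)

-- ===== VERDICT (by name: the statement is the Claim_ definition above) =====
theorem split_map_in_two_columns_spec : Claim_equal_split_map_in_two_columns := by
  intro t _
  show split_map_in_two_columns t = split_map_in_two_columns_alt t
  simpa [split_map_in_two_columns] using split_foldl_inv t []
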